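-- pv_equiv track=rewrite | github.com/HongMari/MARCoBot | engine/field_builders.py | normalize_653_keywords_for_hint
-- ===== SOURCE A (Python) =====
-- def normalize_653_keywords_for_hint(kws: list[str]) -> list[str]:
--     seen = set()
--     out = []
--     for w in (kws or []):
--         w = (w or "").strip()
--         if w and w not in seen:
--             seen.add(w)
--             out.append(w)
--     return sorted(out)[:7]
-- ===== SOURCE B (Python) =====
-- def normalize_653_keywords_for_hint(kws: list[str]) -> list[str]:
--     remaining = {w.strip() for w in kws if w.strip()}
--     out = []
--     for _ in range(7):
--         if not remaining:
--             break
--         m = min(remaining)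
--         out.append(m)
--         remaining.discard(m)
--     return out
-- ===== Notes on version B (the rewrite author's own statement) =====
-- stated objective: alternative
-- what changed: Replaces the seen-set loop plus full sort-and-slice by a set comprehension followed by repeated min-extraction (selection of the 7 smallest), avoiding a full sort.
import Mathlib
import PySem

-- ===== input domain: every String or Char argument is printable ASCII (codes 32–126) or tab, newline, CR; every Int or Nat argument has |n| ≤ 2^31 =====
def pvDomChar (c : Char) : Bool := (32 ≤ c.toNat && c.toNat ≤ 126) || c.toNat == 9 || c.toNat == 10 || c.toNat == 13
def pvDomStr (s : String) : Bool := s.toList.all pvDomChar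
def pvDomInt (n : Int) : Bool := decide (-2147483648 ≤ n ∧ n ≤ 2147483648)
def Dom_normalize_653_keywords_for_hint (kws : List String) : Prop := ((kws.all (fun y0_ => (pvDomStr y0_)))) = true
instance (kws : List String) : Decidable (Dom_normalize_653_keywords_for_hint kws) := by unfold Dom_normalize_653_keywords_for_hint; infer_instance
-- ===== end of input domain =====

-- B replaces A's seen-set loop + full sort-and-slice by a set comprehension and seven
-- min-extractions (partial selection); same result, a different algorithm of similar cost.


-- ===== PORT A =====
-- loop body of A: w = w.strip(); if w and w not in seen: seen.add(w); out.append(w)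
def pvStepA (acc : PySem.Set String × List String) (w0 : String) : PySem.Set String × List String :=
  let w := PySem.Str.strip w0
  if !(w == "") && !(PySem.Set.contains acc.1 w) then (PySem.Set.add acc.1 w, acc.2 ++ [w])
  else acc

def normalize_653_keywords_for_hint (kws : List String) : List String :=
  let st := kws.foldl pvStepA (PySem.Set.empty, [])
  (PySem.List.sorted st.2 (fun x => x) false).take 7

-- ===== PORT B =====
-- the set comprehension {w.strip() for w in kws if w.strip()}
def pvStepB (s : PySem.Set String) (w : String) : PySem.Set String :=
  if !(PySem.Str.strip w == "") then PySem.Set.add s (PySem.Str.strip w) else s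

-- 'for _ in range(7): if not remaining: break; m = min(remaining); out.append(m); remaining.discard(m)'
def pvSelectMin : Nat → PySem.Set String → List String → List String
  | 0, _, out => out
  | k + 1, remaining, out =>
    if remaining.isEmpty then out
    else
      match PySem.List.min? remaining (fun x => x) with
      | none => out
      | some m => pvSelectMin k (PySem.Set.discard remaining m) (out ++ [m])

def normalize_653_keywords_for_hint_alt (kws : List String) : List String :=
  let remaining : PySem.Set String := kws.foldl pvStepB PySem.Set.empty
  pvSelectMin 7 remaining []

-- ===== PRECONDITION & SPEC =====
def Spec_normalize_653_keywords_for_hint (kws : List String) (out : List String) : Prop := out = normalize_653_keywords_for_hint_alt kws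
instance (kws : List String) (out : List String) : Decidable (Spec_normalize_653_keywords_for_hint kws out) := by unfold Spec_normalize_653_keywords_for_hint; infer_instance

-- ===== CLAIM (what is proved, stated in full; the proofs are below) =====
def Claim_equal_normalize_653_keywords_for_hint : Prop := ∀ (kws : List String), Dom_normalize_653_keywords_for_hint kws → Spec_normalize_653_keywords_for_hint kws (normalize_653_keywords_for_hint kws)

-- ===== LEMMAS AND PROOFS =====

-- A's step on a diagonal pair (seen = out as lists) is B's step on both components.
theorem pvStepA_diag (s : PySem.Set String) (w0 : String) :
    pvStepA (s, s) w0 = (pvStepB s w0, pvStepB s w0) := by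
  unfold pvStepA pvStepB
  by_cases hne : (PySem.Str.strip w0 == "") = true
  · simp [hne]
  · by_cases hc : (PySem.Set.contains s (PySem.Str.strip w0)) = true
    · have hadd : PySem.Set.add s (PySem.Str.strip w0) = s :=
        PySem.Set.add_of_mem ((PySem.Set.contains_iff s _).mp hc)
      simp only [hne, hc]
      simp [hadd]
    · have hmem : PySem.Str.strip w0 ∉ s := fun h => hc ((PySem.Set.contains_iff s _).mpr h)
      simp only [hne, hc]
      simp [PySem.Set.add_of_not_mem hmem]

-- hence A's pair fold stays diagonal and its list component is B's set.
theorem pvFoldA_eq (kws : List String) : ∀ (s : PySem.Set String),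
    kws.foldl pvStepA (s, s) = (kws.foldl pvStepB s, kws.foldl pvStepB s) := by
  induction kws with
  | nil => intro s; rfl
  | cons w0 rest ih =>
    intro s
    rw [List.foldl_cons, List.foldl_cons, pvStepA_diag, ih]

theorem pvFoldB_nodup (kws : List String) : ∀ (s : PySem.Set String), s.Nodup →
    (kws.foldl pvStepB s).Nodup := by
  induction kws with
  | nil => intro s hs; exact hs
  | cons w0 rest ih =>
    intro s hs
    rw [List.foldl_cons]
    by_cases hne : (PySem.Str.strip w0 == "") = true
    · have hstep : pvStepB s w0 = s := by simp [pvStepB, hne]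
      rw [hstep]; exact ih s hs
    · have hstep : pvStepB s w0 = PySem.Set.add s (PySem.Str.strip w0) := by simp [pvStepB, hne]
      rw [hstep]; exact ih _ (PySem.Set.nodup_add s _ hs)

-- Pairwise ≤ plus Nodup gives Pairwise <
theorem pvPairwiseLt {l : List String} (h1 : l.Pairwise (· ≤ ·)) (h2 : l.Nodup) :
    l.Pairwise (· < ·) :=
  (h1.and h2).imp (fun h => lt_of_le_of_ne h.1 h.2)

-- k min-extractions from a duplicate-free set are the first k of its sort.
theorem pvSelect_eq : ∀ (k : Nat) (l : PySem.Set String) (out : List String), l.Nodup →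
    pvSelectMin k l out = out ++ (PySem.List.sorted l (fun x => x) false).take k := by
  intro k
  induction k with
  | zero => intro l out _; simp [pvSelectMin]
  | succ k ih =>
    intro l out hnd
    by_cases hl : l = []
    · subst hl; simp [pvSelectMin, PySem.List.sorted]
    · have hne : l.isEmpty = false := by simpa [List.isEmpty_iff] using hl
      obtain ⟨m, hm⟩ : ∃ m, PySem.List.min? l (fun x => x) = some m := by
        cases h : PySem.List.min? l (fun x => x) with
        | none => exact absurd ((PySem.List.min?_eq_none_iff l _).mp h) hl
        | some m => exact ⟨m, rfl⟩
      obtain ⟨h, t, hs⟩ : ∃ h t, PySem.List.sorted l (fun x => x) false = h :: t := by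
        cases hx : PySem.List.sorted l (fun x => x) false with
        | nil => exact absurd ((PySem.List.sorted_eq_nil_iff l _ false).mp hx) hl
        | cons h t => exact ⟨h, t, rfl⟩
      have hperm : (PySem.List.sorted l (fun x => x) false).Perm l :=
        PySem.List.sorted_perm l _ false
      have hmin : ∀ y ∈ l, m ≤ y := PySem.List.min?_isMin hm
      have hhd : ∀ y ∈ l, h ≤ y := PySem.List.key_head_sorted_le l (fun x => x) hs
      have hm_mem : m ∈ l := PySem.List.min?_mem hm
      have hh_mem : h ∈ l := hperm.mem_iff.mp (by simp [hs])
      have hmh : m = h := le_antisymm (hmin h hh_mem) (hhd m hm_mem)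
      subst hmh
      have hsort_nodup : (PySem.List.sorted l (fun x => x) false).Nodup := hperm.nodup_iff.mpr hnd
      have hsort_pw : (PySem.List.sorted l (fun x => x) false).Pairwise (· ≤ ·) :=
        PySem.List.sorted_pairwise l (fun x => x)
      have ht_lt : t.Pairwise (· < ·) := by
        have := pvPairwiseLt hsort_pw hsort_nodup
        rw [hs] at this; exact this.of_cons
      have ht_nodup : t.Nodup := by rw [hs] at hsort_nodup; exact hsort_nodup.of_cons
      have hd_nodup : (PySem.Set.discard l m).Nodup := PySem.Set.nodup_discard l m hnd
      have ht_perm_erase : t.Perm (l.erase m) := by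
        have hp : (m :: t).Perm l := by rw [← hs]; exact hperm
        exact (List.cons_perm_iff_perm_erase.mp hp).2
      have hperm_dt : t.Perm (PySem.Set.discard l m) := by
        refine (List.perm_ext_iff_of_nodup ht_nodup hd_nodup).mpr ?_
        intro x
        rw [PySem.Set.mem_discard l m x]
        constructor
        · intro hx
          have hx2 := hnd.mem_erase_iff.mp (ht_perm_erase.mem_iff.mp hx)
          exact ⟨hx2.2, hx2.1⟩
        · intro hx
          exact ht_perm_erase.mem_iff.mpr (hnd.mem_erase_iff.mpr ⟨hx.2, hx.1⟩)
      have hsorted_d : PySem.List.sorted (PySem.Set.discard l m) (fun x => x) false = t :=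
        PySem.List.sorted_eq_of_perm_of_pairwise_lt _ _ _ hperm_dt ht_lt
      calc pvSelectMin (k + 1) l out
          = pvSelectMin k (PySem.Set.discard l m) (out ++ [m]) := by
            simp [pvSelectMin, hne, hm]
        _ = (out ++ [m]) ++ (PySem.List.sorted (PySem.Set.discard l m) (fun x => x) false).take k :=
            ih _ _ hd_nodup
        _ = out ++ (PySem.List.sorted l (fun x => x) false).take (k + 1) := by
            rw [hsorted_d, hs]; simp

-- ===== VERDICT (by name: the statement is the Claim_ definition above) =====
theorem normalize_653_keywords_for_hint_spec : Claim_equal_normalize_653_keywords_for_hint := by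
  intro kws _
  unfold Spec_normalize_653_keywords_for_hint normalize_653_keywords_for_hint normalize_653_keywords_for_hint_alt
  have h2 : (kws.foldl pvStepB PySem.Set.empty).Nodup :=
    pvFoldB_nodup kws PySem.Set.empty List.nodup_nil
  have h1 : kws.foldl pvStepA (PySem.Set.empty, ([] : List String))
      = (kws.foldl pvStepB PySem.Set.empty, kws.foldl pvStepB PySem.Set.empty) :=
    pvFoldA_eq kws PySem.Set.empty
  simp only [h1, pvSelect_eq 7 _ [] h2, List.nil_append]
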